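-- pv_equiv track=rewrite | github.com/maxaaa9/Fundamentals | Fundamentals/29.09 - List Basics - exercise/Lists - additional tasks/list_manipulator.py | first_odd_or_even
-- ===== SOURCE A (Python) =====
-- def first_odd_or_even(my_list, first_count, even_or_odd) -> list:
--     first_odd_or_even_list = []
--     needed_numbers = 1
--     if even_or_odd == "even":
--         for check_even in my_list:
--             if check_even % 2 == 0 and needed_numbers <= first_count:
--                 first_odd_or_even_list.append(check_even)
--                 needed_numbers += 1
--     elif even_or_odd == "odd":
--         for check_odd in my_list:
--             if check_odd % 2 != 0 and needed_numbers <= first_count: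
--                 first_odd_or_even_list.append(check_odd)
--                 needed_numbers += 1
--     return first_odd_or_even_list
-- ===== SOURCE B (Python) =====
-- def first_odd_or_even(my_list, first_count, even_or_odd) -> list:
--     if even_or_odd == "even":
--         r = 0
--     elif even_or_odd == "odd":
--         r = 1
--     else:
--         return []
--
--     def take(seg, k):
--         # take up to k elements with parity r from seg, divide and conquer
--         if k <= 0 or not seg:
--             return []
--         if len(seg) == 1:
--             return seg[:] if seg[0] % 2 == r else []
--         mid = len(seg) // 2
--         left = take(seg[:mid], k)
--         return left + take(seg[mid:], k - len(left))
--
--     return take(list(my_list), first_count)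
-- ===== Notes on version B (the rewrite author's own statement) =====
-- stated objective: alternative
-- what changed: Replaces A's single counted filter loop with a recursive divide-and-conquer splitter that collects up to k parity matches from the left half and then fills the remaining quota from the right half (pruning it when the quota is full).
import Mathlib
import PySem

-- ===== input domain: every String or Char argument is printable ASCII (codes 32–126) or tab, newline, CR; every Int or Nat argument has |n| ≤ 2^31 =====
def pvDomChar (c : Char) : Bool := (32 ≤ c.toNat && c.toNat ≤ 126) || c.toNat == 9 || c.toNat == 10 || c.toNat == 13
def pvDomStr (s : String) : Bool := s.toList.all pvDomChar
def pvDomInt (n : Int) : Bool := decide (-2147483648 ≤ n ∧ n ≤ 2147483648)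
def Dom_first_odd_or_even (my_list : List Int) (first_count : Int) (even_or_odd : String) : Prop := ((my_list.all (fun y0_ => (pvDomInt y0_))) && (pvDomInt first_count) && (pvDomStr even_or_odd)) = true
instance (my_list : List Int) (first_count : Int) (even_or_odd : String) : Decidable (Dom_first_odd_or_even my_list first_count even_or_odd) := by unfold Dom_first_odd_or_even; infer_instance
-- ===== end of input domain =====

-- B replaces A's counted filter loop by a recursive divide-and-conquer quota-take; objective: alternative.

-- ===== PORT A =====
def first_odd_or_even (my_list : List Int) (first_count : Int) (even_or_odd : String) : List Int :=
  if even_or_odd = "even" then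
    (my_list.foldl (fun (s : List Int × Int) check_even =>
      if PySem.Int.mod check_even 2 = 0 ∧ s.2 ≤ first_count then (s.1 ++ [check_even], s.2 + 1) else s)
      ([], 1)).1
  else if even_or_odd = "odd" then
    (my_list.foldl (fun (s : List Int × Int) check_odd =>
      if PySem.Int.mod check_odd 2 ≠ 0 ∧ s.2 ≤ first_count then (s.1 ++ [check_odd], s.2 + 1) else s)
      ([], 1)).1
  else []

-- ===== PORT B =====
-- B's inner `take`: divide and conquer, up to k elements of parity r from seg
def dcTake (r : Int) (seg : List Int) (k : Int) : List Int :=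
  if _h0 : k ≤ 0 ∨ seg = [] then []
  else if _h1 : seg.length = 1 then
    (if PySem.Int.mod (seg.headD 0) 2 = r then seg else [])
  else
    dcTake r (seg.take (seg.length / 2)) k ++
      dcTake r (seg.drop (seg.length / 2))
        (k - (dcTake r (seg.take (seg.length / 2)) k).length)
termination_by seg.length
decreasing_by
  · have hne : seg ≠ [] := fun h => _h0 (Or.inr h)
    have : seg.length ≠ 0 := by simpa using hne
    simp only [List.length_take]
    omega
  · have hne : seg ≠ [] := fun h => _h0 (Or.inr h)
    have : seg.length ≠ 0 := by simpa using hne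
    simp only [List.length_drop]
    omega

def first_odd_or_even_alt (my_list : List Int) (first_count : Int) (even_or_odd : String) : List Int :=
  if even_or_odd = "even" then dcTake 0 my_list first_count
  else if even_or_odd = "odd" then dcTake 1 my_list first_count
  else []

-- ===== PRECONDITION & SPEC =====
def Spec_first_odd_or_even (my_list : List Int) (first_count : Int) (even_or_odd : String) (out : List Int) : Prop := out = first_odd_or_even_alt my_list first_count even_or_odd
instance (my_list : List Int) (first_count : Int) (even_or_odd : String) (out : List Int) : Decidable (Spec_first_odd_or_even my_list first_count even_or_odd out) := by unfold Spec_first_odd_or_even; infer_instance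

-- ===== CLAIM (what is proved, stated in full; the proofs are below) =====
def Claim_equal_first_odd_or_even : Prop := ∀ (my_list : List Int) (first_count : Int) (even_or_odd : String), Dom_first_odd_or_even my_list first_count even_or_odd → Spec_first_odd_or_even my_list first_count even_or_odd (first_odd_or_even my_list first_count even_or_odd)

-- ===== LEMMAS AND PROOFS =====

/-- B's divide-and-conquer take computes "first `k.toNat` elements of parity `r`". -/
theorem dcTake_eq_take_filter (r : Int) :
    ∀ (seg : List Int) (k : Int),
    dcTake r seg k = (seg.filter (fun x => decide (PySem.Int.mod x 2 = r))).take k.toNat := by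
  intro seg k
  fun_induction dcTake r seg k with
  | case1 seg k h0 =>
    rcases h0 with h | h
    · rw [Int.toNat_of_nonpos h]; simp
    · subst h; simp
  | case2 seg k h0 h1 hp =>
    obtain ⟨a, ha⟩ := List.length_eq_one_iff.mp h1
    subst ha
    push Not at h0
    have hk : ∃ n, k.toNat = n + 1 := ⟨k.toNat - 1, by omega⟩
    obtain ⟨n, hn⟩ := hk
    simp at hp
    simp [hp, hn]
  | case3 seg k h0 h1 hp =>
    obtain ⟨a, ha⟩ := List.length_eq_one_iff.mp h1
    subst ha
    simp at hp
    simp [hp]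
  | case4 seg k h0 h1 ihL ihR =>
    push Not at h0
    rw [ihR, ihL]
    conv_rhs => rw [← List.take_append_drop (seg.length / 2) seg]
    rw [List.filter_append, List.take_append]
    congr 1
    congr 1
    simp only [List.length_take]
    omega

/-- A's fused loop, from counter `c`, appends to `acc` exactly the first
`(fc - c + 1).toNat` elements of the filtered list. -/
theorem loop_eq_take (p : Int → Prop) [DecidablePred p] (fc : Int) :
    ∀ (l : List Int) (acc : List Int) (c : Int),
    (l.foldl (fun (s : List Int × Int) x =>
        if p x ∧ s.2 ≤ fc then (s.1 ++ [x], s.2 + 1) else s) (acc, c)).1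
      = acc ++ (l.filter (fun x => decide (p x))).take (fc - c + 1).toNat := by
  intro l
  induction l with
  | nil => intro acc c; simp
  | cons x t ih =>
    intro acc c
    by_cases hp : p x
    · by_cases hc : c ≤ fc
      · have h1 : (fc - c + 1).toNat = (fc - (c + 1) + 1).toNat + 1 := by omega
        simp [List.foldl_cons, hp, hc, ih, h1]
      · have h0 : (fc - c + 1).toNat = 0 := by omega
        simp [List.foldl_cons, hp, hc, ih, h0]
    · simp [List.foldl_cons, hp, ih]

theorem odd_pred_eq (x : Int) :
    (decide (¬ PySem.Int.mod x 2 = 0)) = (decide (PySem.Int.mod x 2 = 1)) := by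
  have h := PySem.Int.mod_eq_emod_of_pos (a := x) (b := 2) (by omega)
  simp only [decide_eq_decide, h]
  omega

-- ===== VERDICT (by name: the statement is the Claim_ definition above) =====
theorem first_odd_or_even_spec : Claim_equal_first_odd_or_even := by
  intro my_list first_count even_or_odd _
  unfold Spec_first_odd_or_even first_odd_or_even first_odd_or_even_alt
  have hmax : (first_count - 1 + 1).toNat = first_count.toNat := by omega
  split_ifs with h1 h2
  · rw [loop_eq_take (fun x => PySem.Int.mod x 2 = 0) first_count my_list [] 1,
      List.nil_append, hmax, dcTake_eq_take_filter]
  · rw [loop_eq_take (fun x => PySem.Int.mod x 2 ≠ 0) first_count my_list [] 1,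
      List.nil_append, hmax, dcTake_eq_take_filter,
      List.filter_congr (fun x _ => odd_pred_eq x)]
  · rfl
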